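-- pv_equiv track=rewrite | github.com/doraemon1293/Leetcode | 1178. Number of Valid Words for Each Puzzle.py | findNumOfValidWords
-- ===== SOURCE A (Python) =====
-- import collections
--
-- def findNumOfValidWords(words: list, puzzles: list) -> list:
--     c_words = collections.defaultdict(int)
--
--     for word in words:
--         s = frozenset(word)
--         if len(s) <= 7:
--             mask = 0
--             for ch in s:
--                 mask |= 1 << ord(ch) - ord("a")
--             c_words[mask] += 1
--     ans = []
--
--     def foo(puzzle):
--         all_masks = set([1 << (ord(puzzle[0]) - ord('a'))])
--         for ch in puzzle[1:]:
--             new_masks = set()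
--             for mask in all_masks:
--                 new_masks.add(mask | (1 << (ord(ch) - ord('a'))))
--             all_masks=all_masks|new_masks
--         return sum(c_words[mask] for mask in all_masks)
--
--     for puzzle in puzzles:
--         ans.append(foo(puzzle))
--     return ans
-- ===== SOURCE B (Python) =====
-- def findNumOfValidWords(words: list, puzzles: list) -> list:
--     # Bucket words by the bitmask of their distinct letters, then answer each puzzle
--     # by one scan of the buckets with bit tests (no power-set of submasks is built).
--     count = {}
--     for word in words:
--         s = set(word)
--         if len(s) <= 7:
--             mask = 0
--             for ch in s:
--                 mask |= 1 << (ord(ch) - ord('a'))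
--             count[mask] = count.get(mask, 0) + 1
--     res = []
--     for p in puzzles:
--         first = 1 << (ord(p[0]) - ord('a'))
--         full = 0
--         for ch in p:
--             full |= 1 << (ord(ch) - ord('a'))
--         res.append(sum(v for m, v in count.items() if m & full == m and m & first))
--     return res
-- ===== Notes on version B (the rewrite author's own statement) =====
-- stated objective: alternative
-- what changed: Keeps the word-to-letter-bitmask bucketing but replaces A's per-puzzle power-set construction (growing a set of all first-letter submasks and summing the counter over it) by computing the puzzle's full mask and first-letter bit once and scanning the mask buckets with two bit tests (m & full == m and m & first).
import Mathlib
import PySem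

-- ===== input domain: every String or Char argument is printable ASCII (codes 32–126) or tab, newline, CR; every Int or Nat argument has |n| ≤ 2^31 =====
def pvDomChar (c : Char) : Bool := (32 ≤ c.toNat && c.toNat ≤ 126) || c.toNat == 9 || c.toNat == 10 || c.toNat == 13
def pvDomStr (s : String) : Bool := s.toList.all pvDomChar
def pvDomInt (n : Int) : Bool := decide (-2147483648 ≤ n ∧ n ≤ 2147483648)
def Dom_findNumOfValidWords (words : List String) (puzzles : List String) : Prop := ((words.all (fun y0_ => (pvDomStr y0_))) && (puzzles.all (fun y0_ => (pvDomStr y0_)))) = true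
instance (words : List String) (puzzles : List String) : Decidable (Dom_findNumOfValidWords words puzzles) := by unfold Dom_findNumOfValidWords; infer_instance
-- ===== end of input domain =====

-- B replaces A's per-puzzle power-set-of-bitmasks construction by a mask-free single scan of
-- word letter-signature buckets (objective: alternative algorithm, similar size).

-- ===== PORT A =====
-- 1 << (ord(ch) - ord('a')); Pre_ guarantees ord ch ≥ 97 wherever this is evaluated
-- (Python raises ValueError on a negative shift count), so .toNat is exact there.
def pvChBit (ch : Char) : Int := (1 : Int) <<< (((ch.toNat : Int) - 97).toNat)

def findNumOfValidWords (words : List String) (puzzles : List String) : List Int :=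
  -- c_words = defaultdict(int); for word in words: s = frozenset(word); if len(s) <= 7: build mask, c_words[mask] += 1
  -- (the mask fold over the frozenset is order-independent, so folding in the PySem.Set order is exact)
  let cWords : PySem.Dict Int Int := words.foldl (fun d word =>
    let s : PySem.Set Char := PySem.Set.ofList word.toList
    if s.length ≤ 7 then
      let mask : Int := s.foldl (fun m ch => PySem.Int.bor m (pvChBit ch)) 0
      d.insert mask (d.getD mask 0 + 1)
    else d) PySem.Dict.empty
  -- foo(puzzle); puzzle[0] is some under Pre_ (puzzles nonempty); reading c_words[mask] with a
  -- defaultdict inserts missing keys with value 0, which never changes any later sum → getD is exact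
  let foo : String → Int := fun puzzle =>
    let allMasks : PySem.Set Int :=
      (PySem.List.slice puzzle.toList (some 1) none).foldl  -- for ch in puzzle[1:]
        (fun am ch =>
          let newMasks : PySem.Set Int :=
            am.foldl (fun nm m => PySem.Set.add nm (PySem.Int.bor m (pvChBit ch))) PySem.Set.empty
          PySem.Set.union am newMasks)
        (PySem.Set.ofList [pvChBit ((PySem.Str.pyGet? puzzle 0).getD 'a')])
    -- sum over a set: order-independent, so summing in the PySem.Set order is exact
    (allMasks.map (fun m => cWords.getD m 0)).sum
  puzzles.foldl (fun ans puzzle => ans ++ [foo puzzle]) []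

-- ===== PORT B =====
def findNumOfValidWords_alt (words : List String) (puzzles : List String) : List Int :=
  -- count[mask-of-distinct-letters] += 1 for words with at most 7 distinct letters
  -- (the mask fold over the set is order-independent, so folding in the PySem.Set order is exact)
  let count : PySem.Dict Int Int := words.foldl (fun d word =>
    let s : PySem.Set Char := PySem.Set.ofList word.toList
    if s.length ≤ 7 then
      let mask : Int := s.foldl (fun m ch => PySem.Int.bor m (pvChBit ch)) 0
      d.insert mask (d.getD mask 0 + 1)
    else d) PySem.Dict.empty
  puzzles.foldl (fun res p =>
    let first : Int := pvChBit ((PySem.Str.pyGet? p 0).getD 'a')   -- p[0]: some under Pre_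
    let full : Int := p.toList.foldl (fun fm ch => PySem.Int.bor fm (pvChBit ch)) 0
    -- sum(v for m, v in count.items() if m & full == m and m & first)
    res ++ [(count.items.map (fun mv =>
        if (PySem.Int.band mv.1 full == mv.1 && !(PySem.Int.band mv.1 first == 0)) then mv.2 else 0)).sum]) []

-- ===== PRECONDITION & SPEC =====
-- Pre_ is exactly the set of inputs on which Python A returns: A raises IndexError on an empty
-- puzzle and ValueError (negative shift) on any puzzle letter below 'a', or on any letter below
-- 'a' of a word having at most 7 distinct letters (words with more distinct letters are skipped).
def Pre_findNumOfValidWords (words : List String) (puzzles : List String) : Prop :=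
  (puzzles.all (fun p => !(p.toList.isEmpty) && p.toList.all (fun c => 97 ≤ c.toNat))
    && words.all (fun w => !((PySem.Set.ofList w.toList).length ≤ 7)
          || w.toList.all (fun c => 97 ≤ c.toNat))) = true
instance (words : List String) (puzzles : List String) : Decidable (Pre_findNumOfValidWords words puzzles) := by unfold Pre_findNumOfValidWords; infer_instance
def pvWitness_findNumOfValidWords : List String × List String := (["ape", "pea"], ["apex"])

def Spec_findNumOfValidWords (words : List String) (puzzles : List String) (out : List Int) : Prop := out = findNumOfValidWords_alt words puzzles
instance (words : List String) (puzzles : List String) (out : List Int) : Decidable (Spec_findNumOfValidWords words puzzles out) := by unfold Spec_findNumOfValidWords; infer_instance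

-- ===== CLAIM (what is proved, stated in full; the proofs are below) =====
def Claim_equal_findNumOfValidWords : Prop := ∀ (words : List String) (puzzles : List String), Dom_findNumOfValidWords words puzzles → Pre_findNumOfValidWords words puzzles → Spec_findNumOfValidWords words puzzles (findNumOfValidWords words puzzles)

-- ===== LEMMAS AND PROOFS =====

-- the letter bit on the Nat side, and the mask of a list of letters
def pvBitC (c : Char) : Nat := 1 <<< (c.toNat - 97)
def pvNMask (l : List Char) : Nat := l.foldl (fun m c => m ||| pvBitC c) 0
-- B's signature of a word, and the list of signatures of the bucketed words
def pvKey (w : String) : List Char := PySem.List.sorted (PySem.Set.ofList w.toList) (fun x => x)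
def pvKs (words : List String) : List (List Char) :=
  words.filterMap (fun w => if (pvKey w).length ≤ 7 then some (pvKey w) else none)
def pvG (k : List Char) : Int := (pvNMask k : Nat)
def pvInv (k : List Char) : Prop := k.Pairwise (· < ·) ∧ ∀ c ∈ k, 97 ≤ c.toNat

theorem pvFoldOr_pull (l : List Char) (a : Nat) :
    l.foldl (fun m c => m ||| pvBitC c) a = a ||| pvNMask l := by
  induction l generalizing a with
  | nil => simp [pvNMask]
  | cons c t ih =>
    simp only [pvNMask, List.foldl_cons, Nat.zero_or]
    rw [ih, ih (pvBitC c), Nat.or_assoc]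

theorem pvNMask_cons (c : Char) (l : List Char) :
    pvNMask (c :: l) = pvBitC c ||| pvNMask l := by
  show List.foldl (fun m c => m ||| pvBitC c) (0 ||| pvBitC c) l = _
  rw [pvFoldOr_pull, Nat.zero_or, pvNMask]

theorem pvNMask_testBit (l : List Char) (i : Nat) :
    (pvNMask l).testBit i = true ↔ ∃ c ∈ l, c.toNat - 97 = i := by
  induction l with
  | nil => simp [pvNMask]
  | cons c t ih =>
    rw [pvNMask_cons]
    simp only [Nat.testBit_or, Bool.or_eq_true, ih, List.mem_cons]
    constructor
    · rintro (h | ⟨x, hx, rfl⟩)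
      · exact ⟨c, Or.inl rfl, by
          have : pvBitC c = 2 ^ (c.toNat - 97) := by simp [pvBitC, Nat.shiftLeft_eq]
          rw [this, Nat.testBit_two_pow] at h
          simpa using h.symm⟩
      · exact ⟨x, Or.inr hx, rfl⟩
    · rintro ⟨x, (rfl | hx), rfl⟩
      · left
        have : pvBitC x = 2 ^ (x.toNat - 97) := by simp [pvBitC, Nat.shiftLeft_eq]
        rw [this, Nat.testBit_two_pow]
        simp
      · exact Or.inr ⟨x, hx, rfl⟩

theorem pvNMask_ext (l l' : List Char) (_h : ∀ c ∈ l, 97 ≤ c.toNat) (_h' : ∀ c ∈ l', 97 ≤ c.toNat)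
    (hm : ∀ c, c ∈ l ↔ c ∈ l') : pvNMask l = pvNMask l' := by
  apply Nat.eq_of_testBit_eq
  intro i
  rw [Bool.eq_iff_iff, pvNMask_testBit, pvNMask_testBit]
  constructor
  · rintro ⟨c, hc, rfl⟩; exact ⟨c, (hm c).mp hc, rfl⟩
  · rintro ⟨c, hc, rfl⟩; exact ⟨c, (hm c).mpr hc, rfl⟩

theorem pvNMask_mem_of_eq (l l' : List Char) (h : ∀ c ∈ l, 97 ≤ c.toNat)
    (h' : ∀ c ∈ l', 97 ≤ c.toNat) (he : pvNMask l = pvNMask l') : ∀ c, c ∈ l ↔ c ∈ l' := by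
  have key : ∀ (a b : List Char), (∀ c ∈ a, 97 ≤ c.toNat) → (∀ c ∈ b, 97 ≤ c.toNat) →
      pvNMask a = pvNMask b → ∀ c ∈ a, c ∈ b := by
    intro a b ha hb hab c hc
    have h1 : (pvNMask a).testBit (c.toNat - 97) = true :=
      (pvNMask_testBit a _).mpr ⟨c, hc, rfl⟩
    rw [hab] at h1
    obtain ⟨c', hc', hcc⟩ := (pvNMask_testBit b _).mp h1
    have h2 := ha c hc
    have h3 := hb c' hc'
    have hnat : c'.toNat = c.toNat := by omega
    have : c' = c := Char.ext (by exact UInt32.toNat_inj.mp hnat)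
    exact this ▸ hc'
  intro c
  exact ⟨fun hc => key l l' h h' he c hc, fun hc => key l' l h' h he.symm c hc⟩

theorem pvChBit_eq (c : Char) (h : 97 ≤ c.toNat) : pvChBit c = (pvBitC c : Nat) := by
  have h1 : ((c.toNat : Int) - 97).toNat = c.toNat - 97 := by omega
  simp only [pvChBit, pvBitC, h1]
  rfl

theorem pvBridge (l : List Char) (h : ∀ c ∈ l, 97 ≤ c.toNat) (n : Nat) :
    l.foldl (fun m ch => PySem.Int.bor m (pvChBit ch)) ((n : Nat) : Int)
      = ((l.foldl (fun m c => m ||| pvBitC c) n : Nat) : Int) := by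
  induction l generalizing n with
  | nil => rfl
  | cons c t ih =>
    simp only [List.foldl_cons]
    rw [pvChBit_eq c (h c (by simp)), PySem.Int.bor_natCast]
    exact ih (fun c hc => h c (by simp [hc])) (n ||| pvBitC c)

theorem pvInv_key (w : String) (h : ∀ c ∈ w.toList, 97 ≤ c.toNat) : pvInv (pvKey w) := by
  constructor
  · exact PySem.List.sorted_ofList_pairwise_lt w.toList
  · intro c hc
    have : c ∈ PySem.Set.ofList w.toList := (PySem.List.mem_sorted _ _ _ _).mp hc
    exact h c ((PySem.Set.mem_ofList _ _).mp this)

theorem pvMem_foldAdd (am : List Int) (acc : PySem.Set Int) (h : Int → Int) (m : Int) :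
    m ∈ am.foldl (fun nm x => PySem.Set.add nm (h x)) acc ↔ m ∈ acc ∨ ∃ x ∈ am, m = h x := by
  induction am generalizing acc with
  | nil => simp
  | cons a t ih =>
    simp only [List.foldl_cons, ih, PySem.Set.mem_add, List.mem_cons]
    constructor
    · rintro (( h1 | h1) | ⟨x, hx, rfl⟩)
      · exact Or.inl h1
      · exact Or.inr ⟨a, Or.inl rfl, h1⟩
      · exact Or.inr ⟨x, Or.inr hx, rfl⟩
    · rintro (h1 | ⟨x, (rfl | hx), rfl⟩)
      · exact Or.inl (Or.inl h1)
      · exact Or.inl (Or.inr rfl)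
      · exact Or.inr ⟨x, hx, rfl⟩

theorem pvSum_indicator_zero {α : Type} [BEq α] [LawfulBEq α] (S : List α) (x : α) (hx : x ∉ S) :
    (S.map (fun m => if m == x then (1:Int) else 0)).sum = 0 := by
  induction S with
  | nil => simp
  | cons s t ih =>
    simp only [List.map_cons, List.sum_cons]
    rw [if_neg (by simp only [beq_iff_eq]; rintro rfl; exact hx (by simp)),
        ih (fun h => hx (by simp [h]))]
    simp

theorem pvSum_indicator {α : Type} [BEq α] [LawfulBEq α] (S : List α) (hS : S.Nodup) (x : α) :
    (S.map (fun m => if m == x then (1:Int) else 0)).sum = if x ∈ S then 1 else 0 := by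
  induction S with
  | nil => simp
  | cons s t ih =>
    rw [List.nodup_cons] at hS
    simp only [List.map_cons, List.sum_cons]
    by_cases hsx : s = x
    · subst hsx
      rw [if_pos (by simp), pvSum_indicator_zero t s hS.1, if_pos (by simp)]
      simp
    · rw [if_neg (by simpa using hsx), ih hS.2]
      by_cases hxt : x ∈ t
      · rw [if_pos hxt, if_pos (by simp [hxt])]; simp
      · rw [if_neg hxt, if_neg (by
          intro h
          rcases List.mem_cons.mp h with h | h
          · exact hsx h.symm
          · exact hxt h)]
        simp

theorem pvSum_count_nodup {α : Type} [BEq α] [LawfulBEq α] (S l : List α) (hS : S.Nodup) :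
    (S.map (fun m => (l.count m : Int))).sum = (l.map (fun x => if x ∈ S then (1:Int) else 0)).sum := by
  induction l with
  | nil => simp
  | cons x t ih =>
    simp only [List.map_cons, List.sum_cons]
    have hc : ∀ m : α, ((x :: t).count m : Int) = (t.count m : Int) + (if m == x then 1 else 0) := by
      intro m
      rw [List.count_cons]
      by_cases h : m = x
      · subst h; simp
      · simp [h, (show ¬ x = m from fun e => h e.symm)]
    calc (S.map (fun m => ((x :: t).count m : Int))).sum
        = (S.map (fun m => (t.count m : Int) + (if m == x then 1 else 0))).sum := by
          exact congrArg List.sum (List.map_congr_left (fun m _ => hc m))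
      _ = (S.map (fun m => (t.count m : Int))).sum + (S.map (fun m => if m == x then (1:Int) else 0)).sum :=
          PySem.List.sum_map_add_int S _ _
      _ = (t.map (fun y => if y ∈ S then (1:Int) else 0)).sum + (if x ∈ S then (1:Int) else 0) := by
          rw [ih, pvSum_indicator S hS x]
      _ = (if x ∈ S then (1:Int) else 0) + (t.map (fun y => if y ∈ S then (1:Int) else 0)).sum :=
          add_comm _ _

theorem pvSum_ite_filter {α : Type} (L : List α) (c : α → Bool) (f : α → Int) :
    (L.map (fun k => if c k then f k else 0)).sum = ((L.filter c).map f).sum := by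
  induction L with
  | nil => simp
  | cons x t ih =>
    by_cases h : c x
    · simp [h, ih]
    · simp [h, ih]

theorem pvFold_guard {α κ : Type} [BEq κ] (l : List α) (p : α → Prop) [DecidablePred p] (key : α → κ) :
    l.foldl (fun d w => if p w then d.insert (key w) (d.getD (key w) 0 + 1) else d) PySem.Dict.empty
      = PySem.Dict.counter (l.filterMap (fun w => if p w then some (key w) else none)) := by
  have aux : ∀ (l : List α) (d : PySem.Dict κ Int),
      l.foldl (fun d w => if p w then d.insert (key w) (d.getD (key w) 0 + 1) else d) d
        = (l.filterMap (fun w => if p w then some (key w) else none)).foldl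
            (fun d x => d.insert x (d.getD x 0 + 1)) d := by
    intro l
    induction l with
    | nil => intro d; rfl
    | cons x t ih =>
      intro d
      by_cases h : p x
      · simp only [List.foldl_cons, List.filterMap_cons, if_pos h]
        exact ih _
      · simp only [List.foldl_cons, List.filterMap_cons, if_neg h]
        exact ih _
  rw [aux, PySem.Dict.foldl_insert_getD_add_one_eq_counter]

theorem pvNodupAll (cs : List Char) (S : PySem.Set Int) (hS : S.Nodup) :
    (cs.foldl
        (fun am ch =>
          let newMasks : PySem.Set Int :=
            am.foldl (fun nm x => PySem.Set.add nm (PySem.Int.bor x (pvChBit ch))) PySem.Set.empty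
          PySem.Set.union am newMasks) S).Nodup := by
  induction cs generalizing S with
  | nil => exact hS
  | cons c t ih => exact ih _ (PySem.Set.nodup_union _ _ hS)

theorem pvNMask_append_singleton (l : List Char) (c : Char) :
    pvNMask (l ++ [c]) = pvNMask l ||| pvBitC c := by
  simp [pvNMask, List.foldl_append]

theorem pvMemAll (f : Char) (hf : 97 ≤ f.toNat) :
    ∀ (cs : List Char) (pref : List Char) (S : PySem.Set Int),
    (∀ c ∈ cs, 97 ≤ c.toNat) → (∀ c ∈ pref, 97 ≤ c.toNat) →
    (∀ m, m ∈ S ↔ ∃ bs : List Char, (∀ c ∈ bs, c ∈ pref) ∧ m = pvG (f :: bs)) →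
    (∀ m, m ∈ cs.foldl
        (fun am ch =>
          let newMasks : PySem.Set Int :=
            am.foldl (fun nm x => PySem.Set.add nm (PySem.Int.bor x (pvChBit ch))) PySem.Set.empty
          PySem.Set.union am newMasks) S
      ↔ ∃ bs : List Char, (∀ c ∈ bs, c ∈ pref ++ cs) ∧ m = pvG (f :: bs)) := by
  intro cs
  induction cs with
  | nil =>
    intro pref S _ _ hS m
    simpa using hS m
  | cons c t ih =>
    intro pref S hcs hpref hS m
    have hc : 97 ≤ c.toNat := hcs c (by simp)
    have hstep : ∀ m, m ∈ PySem.Set.union S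
        (S.foldl (fun nm x => PySem.Set.add nm (PySem.Int.bor x (pvChBit c))) PySem.Set.empty)
        ↔ ∃ bs : List Char, (∀ c' ∈ bs, c' ∈ pref ++ [c]) ∧ m = pvG (f :: bs) := by
      intro m
      rw [PySem.Set.mem_union, pvMem_foldAdd]
      constructor
      · rintro (h1 | h1 | ⟨x, hx, rfl⟩)
        · obtain ⟨bs, hbs, rfl⟩ := (hS m).mp h1
          exact ⟨bs, fun c' hc' => by simp [hbs c' hc'], rfl⟩
        · cases h1
        · obtain ⟨bs, hbs, rfl⟩ := (hS x).mp hx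
          refine ⟨bs ++ [c], ?_, ?_⟩
          · intro c' hc'
            rcases List.mem_append.mp hc' with h | h
            · simp [hbs c' h]
            · simp at h; simp [h]
          · show PySem.Int.bor ((pvNMask (f :: bs) : Nat) : Int) (pvChBit c) = _
            rw [pvChBit_eq c hc, PySem.Int.bor_natCast]
            have : (f :: bs) ++ [c] = f :: (bs ++ [c]) := by simp
            rw [pvG, ← pvNMask_append_singleton (f :: bs) c, this]
      · rintro ⟨bs, hbs, rfl⟩
        by_cases hcbs : c ∈ bs
        · -- use bs' = bs.filter (· ≠ c)
          right; right
          set bs' := bs.filter (fun y => !(y == c)) with hbs'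
          have hbsmem : ∀ y, y ∈ bs' ↔ y ∈ bs ∧ y ≠ c := by
            intro y; simp [hbs', List.mem_filter]
          have hmask : pvNMask (f :: bs) = pvNMask ((f :: bs') ++ [c]) := by
            apply pvNMask_ext
            · intro c' hc'
              rcases List.mem_cons.mp hc' with h | h
              · exact h ▸ hf
              · rcases List.mem_append.mp (hbs c' h) with h2 | h2
                · exact hpref c' h2
                · simp at h2; exact h2 ▸ hc
            · intro c' hc'
              rcases List.mem_append.mp hc' with h | h
              · rcases List.mem_cons.mp h with h | h
                · exact h ▸ hf
                · have := (hbsmem c').mp h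
                  rcases List.mem_append.mp (hbs c' this.1) with h2 | h2
                  · exact hpref c' h2
                  · simp at h2; exact h2 ▸ hc
              · simp at h; exact h ▸ hc
            · intro y
              constructor
              · intro hy
                rcases List.mem_cons.mp hy with h | h
                · exact h ▸ (by simp)
                · by_cases hyc : y = c
                  · subst hyc; simp
                  · exact List.mem_append.mpr (Or.inl (List.mem_cons.mpr (Or.inr ((hbsmem y).mpr ⟨h, hyc⟩))))
              · intro hy
                rcases List.mem_append.mp hy with h | h
                · rcases List.mem_cons.mp h with h | h
                  · exact h ▸ (by simp)
                  · exact List.mem_cons.mpr (Or.inr ((hbsmem y).mp h).1)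
                · simp at h; subst h; exact List.mem_cons.mpr (Or.inr hcbs)
          refine ⟨pvG (f :: bs'), (hS _).mpr ⟨bs', ?_, rfl⟩, ?_⟩
          · intro c' hc'
            have h1 := (hbsmem c').mp hc'
            rcases List.mem_append.mp (hbs c' h1.1) with h2 | h2
            · exact h2
            · simp at h2; exact absurd h2 h1.2
          · rw [pvG, pvG, hmask]
            have : (f :: bs') ++ [c] = f :: (bs' ++ [c]) := by simp
            rw [this, ← this, pvNMask_append_singleton (f :: bs') c,
              ← PySem.Int.bor_natCast, ← pvChBit_eq c hc]
        · left
          apply (hS _).mpr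
          refine ⟨bs, ?_, rfl⟩
          intro c' hc'
          rcases List.mem_append.mp (hbs c' hc') with h | h
          · exact h
          · simp at h; exact absurd (h ▸ hc') hcbs
    have goal := ih (pref ++ [c])
      (PySem.Set.union S
        (S.foldl (fun nm x => PySem.Set.add nm (PySem.Int.bor x (pvChBit c))) PySem.Set.empty))
      (fun c' h => hcs c' (by simp [h]))
      (fun c' h => by
        rcases List.mem_append.mp h with h | h
        · exact hpref c' h
        · simp at h; exact h ▸ hc)
      hstep m
    simp only [List.foldl_cons]
    rw [show (pref ++ [c]) ++ t = pref ++ c :: t by simp] at goal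
    exact goal



theorem pvInv_mem (words : List String)
    (hwd : ∀ w ∈ words, (PySem.Set.ofList w.toList).length ≤ 7 → ∀ c ∈ w.toList, 97 ≤ c.toNat)
    (k : List Char) (hk : k ∈ pvKs words) : pvInv k := by
  obtain ⟨w, hw, hsel⟩ := List.mem_filterMap.mp hk
  by_cases h : (pvKey w).length ≤ 7
  · rw [if_pos h] at hsel
    cases hsel
    exact pvInv_key w (hwd w hw (by rwa [pvKey, PySem.List.length_sorted] at h))
  · rw [if_neg h] at hsel; cases hsel

theorem pvKsA_eq (words : List String)
    (hwd : ∀ w ∈ words, (PySem.Set.ofList w.toList).length ≤ 7 → ∀ c ∈ w.toList, 97 ≤ c.toNat) :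
    words.filterMap (fun w => if (PySem.Set.ofList w.toList).length ≤ 7 then
        some ((PySem.Set.ofList w.toList).foldl (fun m ch => PySem.Int.bor m (pvChBit ch)) 0)
      else none)
      = (pvKs words).map pvG := by
  rw [pvKs, List.map_filterMap]
  apply List.filterMap_congr
  intro w hw
  by_cases h : (PySem.Set.ofList w.toList).length ≤ 7
  · rw [if_pos h, if_pos (by rwa [pvKey, PySem.List.length_sorted])]
    have hb : ∀ c ∈ PySem.Set.ofList w.toList, 97 ≤ c.toNat := by
      intro c hc
      exact hwd w hw h c ((PySem.Set.mem_ofList _ _).mp hc)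
    have h0 : (0 : Int) = ((0 : Nat) : Int) := rfl
    rw [Option.map_some]
    congr 1
    rw [h0, pvBridge _ hb 0]
    show pvG (PySem.Set.ofList w.toList) = pvG (pvKey w)
    rw [pvG, pvG]
    congr 1
    apply pvNMask_ext _ _ hb
    · intro c hc
      exact hb c ((PySem.List.mem_sorted _ _ _ _).mp hc)
    · intro c
      exact (PySem.List.mem_sorted _ _ _ _).symm
  · rw [if_neg h, if_neg (by rwa [pvKey, PySem.List.length_sorted])]
    rfl


theorem pvSubset_iff (x pl : List Char) (hx : ∀ c ∈ x, 97 ≤ c.toNat)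
    (hpl : ∀ c ∈ pl, 97 ≤ c.toNat) :
    pvNMask x &&& pvNMask pl = pvNMask x ↔ ∀ c ∈ x, c ∈ pl := by
  constructor
  · intro h c hc
    have h1 : (pvNMask x).testBit (c.toNat - 97) = true := (pvNMask_testBit x _).mpr ⟨c, hc, rfl⟩
    have h2 : (pvNMask x &&& pvNMask pl).testBit (c.toNat - 97) = true := by rw [h]; exact h1
    rw [Nat.testBit_and, Bool.and_eq_true] at h2
    obtain ⟨c', hc', he⟩ := (pvNMask_testBit pl _).mp h2.2
    have hb1 := hx c hc
    have hb2 := hpl c' hc'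
    have hnat : c'.toNat = c.toNat := by omega
    have : c' = c := Char.ext (UInt32.toNat_inj.mp hnat)
    exact this ▸ hc'
  · intro h
    apply Nat.eq_of_testBit_eq
    intro i
    rw [Nat.testBit_and]
    cases h1 : (pvNMask x).testBit i
    · simp
    · obtain ⟨c, hc, rfl⟩ := (pvNMask_testBit x i).mp h1
      simp [(pvNMask_testBit pl _).mpr ⟨c, h c hc, rfl⟩]

theorem pvFirst_iff (x : List Char) (f : Char) (hx : ∀ c ∈ x, 97 ≤ c.toNat)
    (hf : 97 ≤ f.toNat) : pvNMask x &&& pvBitC f ≠ 0 ↔ f ∈ x := by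
  have hbit : pvBitC f = 2 ^ (f.toNat - 97) := by simp [pvBitC, Nat.shiftLeft_eq]
  constructor
  · intro h
    obtain ⟨i, hi⟩ : ∃ i, (pvNMask x &&& pvBitC f).testBit i = true := by
      by_contra hno
      push_neg at hno
      exact h (Nat.eq_of_testBit_eq (fun i => by
        rw [Nat.zero_testBit]
        exact Bool.eq_false_iff.mpr (fun hb => hno i hb)))
    rw [Nat.testBit_and, Bool.and_eq_true, hbit, Nat.testBit_two_pow] at hi
    obtain ⟨c, hc, he⟩ := (pvNMask_testBit x i).mp hi.1
    have : f.toNat - 97 = i := by simpa using hi.2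
    have hb1 := hx c hc
    have hnat : c.toNat = f.toNat := by omega
    have : c = f := Char.ext (UInt32.toNat_inj.mp hnat)
    exact this ▸ hc
  · intro hfin h0
    have hb : (pvNMask x &&& pvBitC f).testBit (f.toNat - 97) = true := by
      rw [Nat.testBit_and, (pvNMask_testBit x _).mpr ⟨f, hfin, rfl⟩, hbit, Nat.testBit_two_pow]
      simp
    rw [h0, Nat.zero_testBit] at hb
    cases hb

theorem pvCondIff (x pl : List Char) (f : Char) (hx : ∀ c ∈ x, 97 ≤ c.toNat)
    (hpl : ∀ c ∈ pl, 97 ≤ c.toNat) (hf : 97 ≤ f.toNat) :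
    ((PySem.Int.band (pvG x) ((pvNMask pl : Nat) : Int) == pvG x
        && !(PySem.Int.band (pvG x) (pvChBit f) == 0)) = true)
      ↔ (f ∈ x ∧ ∀ c ∈ x, c ∈ pl) := by
  rw [Bool.and_eq_true, beq_iff_eq, Bool.not_eq_true', beq_eq_false_iff_ne]
  rw [pvG, pvChBit_eq f hf, PySem.Int.band_natCast, PySem.Int.band_natCast]
  have e1 : (((pvNMask x &&& pvNMask pl : Nat) : Int) = ((pvNMask x : Nat) : Int))
      ↔ pvNMask x &&& pvNMask pl = pvNMask x := Int.natCast_inj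
  have e2 : (((pvNMask x &&& pvBitC f : Nat) : Int) ≠ (0 : Int))
      ↔ pvNMask x &&& pvBitC f ≠ 0 := by
    constructor
    · intro h hq; exact h (by exact_mod_cast congrArg (fun n : Nat => (n : Int)) hq)
    · intro h hq; exact h (by exact_mod_cast hq)
  rw [e1, e2, pvSubset_iff x pl hx hpl, pvFirst_iff x f hx hf]
  exact and_comm

theorem pvPuzzle (words : List String)
    (hwd : ∀ w ∈ words, (PySem.Set.ofList w.toList).length ≤ 7 → ∀ c ∈ w.toList, 97 ≤ c.toNat)
    (p : String) (hp : p.toList ≠ []) (hpc : ∀ c ∈ p.toList, 97 ≤ c.toNat) :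
    (List.map (fun m => (PySem.Dict.counter ((pvKs words).map pvG)).getD m 0)
        (List.foldl
          (fun am ch => PySem.Set.union am
            (List.foldl (fun nm m => PySem.Set.add nm (PySem.Int.bor m (pvChBit ch))) PySem.Set.empty am))
          (PySem.Set.ofList [pvChBit ((PySem.Str.pyGet? p 0).getD 'a')])
          (PySem.List.slice p.toList (some 1) none))).sum =
    (List.map
        (fun mv => if (PySem.Int.band mv.1 (p.toList.foldl (fun fm ch => PySem.Int.bor fm (pvChBit ch)) 0) == mv.1
              && !(PySem.Int.band mv.1 (pvChBit ((PySem.Str.pyGet? p 0).getD 'a')) == 0)) = true then mv.2 else 0)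
        (PySem.Dict.counter ((pvKs words).map pvG)).items).sum := by
  obtain ⟨f, rest, hfl⟩ : ∃ f rest, p.toList = f :: rest := by
    cases h : p.toList with
    | nil => exact absurd h hp
    | cons a b => exact ⟨a, b, rfl⟩
  have hf97 : 97 ≤ f.toNat := hpc f (by rw [hfl]; simp)
  have hrest : ∀ c ∈ rest, 97 ≤ c.toNat := fun c hc => hpc c (by rw [hfl]; simp [hc])
  have hpl : ∀ c ∈ f :: rest, 97 ≤ c.toNat := by rw [← hfl]; exact hpc
  have hfirst : (PySem.Str.pyGet? p 0).getD 'a' = f := by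
    simp [hfl]
  have hslice : PySem.List.slice p.toList (some 1) none = rest := by
    rw [PySem.List.slice_from_one, hfl]
    rfl
  rw [hfirst, hslice, hfl]
  have hfull : (f :: rest).foldl (fun fm ch => PySem.Int.bor fm (pvChBit ch)) 0
      = ((pvNMask (f :: rest) : Nat) : Int) := by
    have h0 : (0 : Int) = ((0 : Nat) : Int) := rfl
    rw [h0, pvBridge _ hpl 0]
    rfl
  rw [hfull]
  -- base set membership
  have hbase : ∀ m, m ∈ PySem.Set.ofList [pvChBit f] ↔
      ∃ bs : List Char, (∀ c ∈ bs, c ∈ ([] : List Char)) ∧ m = pvG (f :: bs) := by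
    intro m
    rw [PySem.Set.mem_ofList]
    simp only [List.mem_singleton]
    constructor
    · rintro rfl
      exact ⟨[], by simp, by rw [pvChBit_eq f hf97, pvG, pvNMask_cons, pvNMask]; simp⟩
    · rintro ⟨bs, hbs, rfl⟩
      have : bs = [] := List.eq_nil_iff_forall_not_mem.mpr (fun x hx => absurd (hbs x hx) (List.not_mem_nil))
      subst this
      rw [pvChBit_eq f hf97, pvG, pvNMask_cons, pvNMask]; simp
  have hmem := pvMemAll f hf97 rest [] _ hrest (by simp) hbase
  simp only [List.nil_append] at hmem
  have hnd := pvNodupAll rest (PySem.Set.ofList [pvChBit f]) (PySem.Set.nodup_ofList _)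
  -- per-key characterization of A's mask set
  have hkey : ∀ x ∈ pvKs words,
      (pvG x ∈ List.foldl
          (fun am ch => PySem.Set.union am
            (List.foldl (fun nm m => PySem.Set.add nm (PySem.Int.bor m (pvChBit ch))) PySem.Set.empty am))
          (PySem.Set.ofList [pvChBit f]) rest)
        ↔ (f ∈ x ∧ ∀ c ∈ x, c ∈ f :: rest) := by
    intro x hx
    have hInv := pvInv_mem words hwd x hx
    rw [hmem (pvG x)]
    constructor
    · rintro ⟨bs, hbs, heq⟩
      have hb2 : ∀ c ∈ f :: bs, 97 ≤ c.toNat := by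
        intro c hc
        rcases List.mem_cons.mp hc with h | h
        · exact h ▸ hf97
        · exact hrest c (hbs c h)
      have hmask : pvNMask x = pvNMask (f :: bs) := by
        have : ((pvNMask x : Nat) : Int) = ((pvNMask (f :: bs) : Nat) : Int) := heq
        exact_mod_cast this
      have hmm := pvNMask_mem_of_eq x (f :: bs) hInv.2 hb2 hmask
      constructor
      · exact (hmm f).mpr (by simp)
      · intro c hc
        rcases List.mem_cons.mp ((hmm c).mp hc) with h | h
        · exact h ▸ (by simp)
        · exact List.mem_cons.mpr (Or.inr (hbs c h))
    · rintro ⟨hfx, hsub⟩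
      refine ⟨x.filter (fun y => !(y == f)), ?_, ?_⟩
      · intro c hc
        have h1 := List.mem_filter.mp hc
        have h2 : ¬ c = f := by simpa using h1.2
        rcases List.mem_cons.mp (hsub c h1.1) with h | h
        · exact absurd h h2
        · exact h
      · rw [pvG, pvG]
        congr 1
        apply pvNMask_ext x (f :: x.filter (fun y => !(y == f))) hInv.2
        · intro c hc
          rcases List.mem_cons.mp hc with h | h
          · exact h ▸ hf97
          · exact hInv.2 c (List.mem_filter.mp h).1
        · intro y
          constructor
          · intro hy
            by_cases hyf : y = f
            · exact hyf ▸ (by simp)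
            · exact List.mem_cons.mpr (Or.inr (List.mem_filter.mpr ⟨hy, by simpa using hyf⟩))
          · intro hy
            rcases List.mem_cons.mp hy with h | h
            · exact h ▸ hfx
            · exact (List.mem_filter.mp h).1
  -- LHS: sum over the mask set = sum of indicators over the bucketed signatures
  simp only [PySem.Dict.getD_counter]
  rw [pvSum_count_nodup _ _ hnd, List.map_map]
  -- RHS: sum over the counter items = sum of indicators over the bucketed signatures
  simp only [PySem.Dict.items_counter]
  rw [List.map_map]
  simp only [Function.comp_def]
  rw [pvSum_ite_filter, pvSum_count_nodup _ _ ((PySem.Set.nodup_ofList ((pvKs words).map pvG)).filter _),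
    List.map_map]
  apply congrArg List.sum
  apply List.map_congr_left
  intro x hx
  have hInv := pvInv_mem words hwd x hx
  have h2 : (pvG x ∈ ((PySem.Set.ofList ((pvKs words).map pvG)).filter
        (fun m => PySem.Int.band m ((pvNMask (f :: rest) : Nat) : Int) == m
          && !(PySem.Int.band m (pvChBit f) == 0))))
      ↔ (f ∈ x ∧ ∀ c ∈ x, c ∈ f :: rest) := by
    rw [List.mem_filter, PySem.Set.mem_ofList]
    constructor
    · rintro ⟨-, hcond⟩
      exact (pvCondIff x (f :: rest) f hInv.2 hpl hf97).mp hcond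
    · intro hc
      exact ⟨List.mem_map.mpr ⟨x, hx, rfl⟩,
        (pvCondIff x (f :: rest) f hInv.2 hpl hf97).mpr hc⟩
  exact if_congr ((hkey x hx).trans h2.symm) rfl rfl

-- ===== VERDICT (by name: the statement is the Claim_ definition above) =====
theorem findNumOfValidWords_spec : Claim_equal_findNumOfValidWords := by
  intro words puzzles _ hPre
  rw [Pre_findNumOfValidWords, Bool.and_eq_true, List.all_eq_true, List.all_eq_true] at hPre
  obtain ⟨h1, h2⟩ := hPre
  have hpz : ∀ p ∈ puzzles, p.toList ≠ [] ∧ ∀ c ∈ p.toList, 97 ≤ c.toNat := by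
    intro p hp
    have h := h1 p hp
    rw [Bool.and_eq_true, List.all_eq_true] at h
    refine ⟨by simpa using h.1, fun c hc => by simpa using h.2 c hc⟩
  have hwd : ∀ w ∈ words, (PySem.Set.ofList w.toList).length ≤ 7 → ∀ c ∈ w.toList, 97 ≤ c.toNat := by
    intro w hw hlen c hc
    have h := h2 w hw
    rw [Bool.or_eq_true, List.all_eq_true] at h
    rcases h with h | h
    · simp at h; omega
    · simpa using h c hc
  unfold Spec_findNumOfValidWords findNumOfValidWords findNumOfValidWords_alt
  simp only []
  rw [pvFold_guard words (fun w => (PySem.Set.ofList w.toList).length ≤ 7)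
        (fun w => (PySem.Set.ofList w.toList).foldl (fun m ch => PySem.Int.bor m (pvChBit ch)) 0),
      pvKsA_eq words hwd,
      PySem.List.foldl_append_singleton_eq_map, PySem.List.foldl_append_singleton_eq_map,
      List.nil_append, List.nil_append]
  apply List.map_congr_left
  intro p hp
  exact pvPuzzle words hwd p (hpz p hp).1 (hpz p hp).2
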